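-- pv_equiv track=rewrite | github.com/188162600/Final-summative | Core/geo.py | polygonUnsharedSides
-- ===== SOURCE A (Python) =====
-- def polygonUnsharedSides(polygons):
--     """
--         :type polygons: typing.Iterable[list]
--         :return:
--         """
--     __edges = {}
--     for __poly in polygons:
--         for __i in range(-1, len(__poly) - 1):
--             __side, __reveredSide = (__poly[__i], __poly[__i + 1]), (__poly[__i + 1], __poly[__i])
--             if __side in __edges:
--                 __edges[__side] += 1
--             elif __reveredSide in __edges:
--                 __edges[__reveredSide] += 1
--             else:
--                 __edges.update({__side: 1})
--     return filter(lambda __x: __edges[__x] == 1, __edges)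
-- ===== SOURCE B (Python) =====
-- def polygonUnsharedSides(polygons):
--     sides = []
--     for poly in polygons:
--         for i in range(-1, len(poly) - 1):
--             sides.append((poly[i], poly[i + 1]))
--     entries = [((min(a, b), max(a, b)), j, (a, b)) for j, (a, b) in enumerate(sides)]
--     result = []
--     while entries:
--         key = entries[0][0]
--         group = [e for e in entries if e[0] == key]
--         entries = [e for e in entries if e[0] != key]
--         if len(group) == 1:
--             result.append((group[0][1], group[0][2]))
--     result.sort(key=lambda t: t[0])
--     return [s for _, s in result]
-- ===== Notes on version B (the rewrite author's own statement) =====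
-- stated objective: alternative
-- what changed: B uses no dictionary at all: it flattens all directed sides into one list, then repeatedly extracts a whole undirected-edge equivalence class by filtering the remaining entries (partition refinement), keeps the classes of size one, and finally sorts the survivors back into first-appearance order by their recorded index, whereas A counts in a dict with two-way (side/reversed-side) key probing and filters the dict keys.
import Mathlib
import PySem

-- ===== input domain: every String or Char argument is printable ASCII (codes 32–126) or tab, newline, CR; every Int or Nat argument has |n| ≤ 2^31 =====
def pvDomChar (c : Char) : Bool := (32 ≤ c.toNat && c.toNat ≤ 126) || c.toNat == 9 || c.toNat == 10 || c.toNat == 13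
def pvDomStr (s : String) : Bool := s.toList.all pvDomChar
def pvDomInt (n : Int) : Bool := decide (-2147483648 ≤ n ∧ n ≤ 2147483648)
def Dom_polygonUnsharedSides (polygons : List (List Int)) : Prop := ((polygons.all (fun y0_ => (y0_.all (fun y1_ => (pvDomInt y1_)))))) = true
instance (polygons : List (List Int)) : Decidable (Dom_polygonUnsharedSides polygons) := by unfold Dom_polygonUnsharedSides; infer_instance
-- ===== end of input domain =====

-- B drops A's dictionary entirely: it flattens all directed sides into one indexed list, repeatedly
-- extracts a whole undirected-edge class by filtering the remaining entries (partition refinement),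
-- keeps the classes of size one, and sorts the survivors back into first-appearance order by index
-- (objective: alternative algorithm, no associative container; not claimed faster).

-- ===== PORT A =====
def polygonUnsharedSides (polygons : List (List Int)) : List (Int × Int) :=
  let edges := polygons.foldl (fun edges poly =>
      (PySem.List.pyRange (-1) ((poly.length : Int) - 1)).foldl (fun edges i =>
        let side := (PySem.List.pyGetD poly i 0, PySem.List.pyGetD poly (i + 1) 0)
        let reveredSide := (PySem.List.pyGetD poly (i + 1) 0, PySem.List.pyGetD poly i 0)
        if edges.contains side then edges.modify side 0 (· + 1)
        else if edges.contains reveredSide then edges.modify reveredSide 0 (· + 1)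
        else edges.insert side 1) edges)
    (PySem.Dict.empty : PySem.Dict (Int × Int) Int)
  edges.keys.filter (fun k => edges.getD k 0 == 1)

-- ===== PORT B =====
-- the while loop of Source B: pop the head's whole undirected class out of `entries` by filtering
def pvGroups : List ((Int × Int) × Int × (Int × Int)) → List (Int × (Int × Int)) → List (Int × (Int × Int))
  | [], result => result
  | e :: rest, result =>
    let key := e.1
    let group := (e :: rest).filter (fun t => t.1 == key)
    let result' := if group.length == 1
      then result ++ [((PySem.List.pyGetD group 0 e).2.1, (PySem.List.pyGetD group 0 e).2.2)]
      else result
    pvGroups ((e :: rest).filter (fun t => t.1 != key)) result'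
termination_by entries _ => entries.length
decreasing_by
  simp only [List.filter_cons, bne_self_eq_false, if_false, List.length_cons, Bool.false_eq_true]
  exact Nat.lt_succ_of_le (List.length_filter_le (fun t => t.1 != e.1) rest)

def polygonUnsharedSides_alt (polygons : List (List Int)) : List (Int × Int) :=
  let sides := polygons.foldl (fun acc poly =>
      (PySem.List.pyRange (-1) ((poly.length : Int) - 1)).foldl (fun acc i =>
        acc ++ [(PySem.List.pyGetD poly i 0, PySem.List.pyGetD poly (i + 1) 0)]) acc) []
  let entries := (PySem.List.enumerate sides 0).map
    (fun js => ((min js.2.1 js.2.2, max js.2.1 js.2.2), js.1, js.2))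
  let result := pvGroups entries []
  (PySem.List.sorted result (fun t => t.1) false).map (fun t => t.2)

-- ===== PRECONDITION & SPEC =====
def Spec_polygonUnsharedSides (polygons : List (List Int)) (out : List (Int × Int)) : Prop := out = polygonUnsharedSides_alt polygons
instance (polygons : List (List Int)) (out : List (Int × Int)) : Decidable (Spec_polygonUnsharedSides polygons out) := by unfold Spec_polygonUnsharedSides; infer_instance

-- ===== CLAIM (what is proved, stated in full; the proofs are below) =====
def Claim_equal_polygonUnsharedSides : Prop := ∀ (polygons : List (List Int)), Dom_polygonUnsharedSides polygons → Spec_polygonUnsharedSides polygons (polygonUnsharedSides polygons)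

-- ===== LEMMAS AND PROOFS =====

def pvCanon (s : Int × Int) : Int × Int := if s.1 ≤ s.2 then s else (s.2, s.1)

-- the list of directed sides contributed by one polygon
def pvSidesOf (poly : List Int) : List (Int × Int) :=
  (PySem.List.pyRange (-1) ((poly.length : Int) - 1)).map
    (fun i => (PySem.List.pyGetD poly i 0, PySem.List.pyGetD poly (i + 1) 0))

-- A's dict update for one side, abstracted over the side
def pvStep (d : PySem.Dict (Int × Int) Int) (s : Int × Int) : PySem.Dict (Int × Int) Int :=
  if d.contains s then d.modify s 0 (· + 1)
  else if d.contains (s.2, s.1) then d.modify (s.2, s.1) 0 (· + 1)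
  else d.insert s 1

-- first occurrence of each undirected-edge class, in order
def pvFirsts (L : List (Int × Int)) : List (Int × Int) :=
  L.foldl (fun acc s => if acc.any (fun k => pvCanon k == pvCanon s) then acc else acc ++ [s]) []

-- number of sides in L in the undirected class of s
def pvCnt (L : List (Int × Int)) (s : Int × Int) : Nat :=
  L.countP (fun t => pvCanon t == pvCanon s)

theorem pvCanon_swap (s : Int × Int) : pvCanon (s.2, s.1) = pvCanon s := by
  obtain ⟨a, b⟩ := s
  simp only [pvCanon]
  split_ifs <;> simp_all [Prod.ext_iff] <;> omega

theorem pvCanon_eq_iff (t s : Int × Int) : pvCanon t = pvCanon s ↔ t = s ∨ t = (s.2, s.1) := by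
  obtain ⟨a, b⟩ := t; obtain ⟨c, d⟩ := s
  simp only [pvCanon]
  split_ifs <;> simp_all [Prod.ext_iff] <;> omega

theorem pvCanon_minmax (s : Int × Int) : (min s.1 s.2, max s.1 s.2) = pvCanon s := by
  obtain ⟨a, b⟩ := s
  simp only [pvCanon]
  split_ifs <;> simp_all [Prod.ext_iff, min_def, max_def]

theorem pvFirsts_snoc (L : List (Int × Int)) (s : Int × Int) :
    pvFirsts (L ++ [s]) =
      if (pvFirsts L).any (fun k => pvCanon k == pvCanon s) then pvFirsts L
      else pvFirsts L ++ [s] := by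
  simp [pvFirsts, List.foldl_append]

theorem pvFirsts_subset (L : List (Int × Int)) : ∀ k ∈ pvFirsts L, k ∈ L := by
  induction L using List.reverseRecOn with
  | nil => simp [pvFirsts]
  | append_singleton L s ih =>
    intro k hk
    rw [pvFirsts_snoc] at hk
    split_ifs at hk with h
    · exact List.mem_append_left _ (ih k hk)
    · rcases List.mem_append.mp hk with h' | h'
      · exact List.mem_append_left _ (ih k h')
      · exact List.mem_append_right _ h'

theorem pvFirsts_pairwise (L : List (Int × Int)) :
    (pvFirsts L).Pairwise (fun a b => pvCanon a ≠ pvCanon b) := by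
  induction L using List.reverseRecOn with
  | nil => simp [pvFirsts]
  | append_singleton L s ih =>
    rw [pvFirsts_snoc]
    split_ifs with h
    · exact ih
    · rw [List.pairwise_append]
      refine ⟨ih, List.pairwise_singleton _ _, ?_⟩
      intro a ha b hb
      rw [List.mem_singleton] at hb
      subst hb
      intro he
      exact h (List.any_eq_true.mpr ⟨a, ha, by simp [he]⟩)

theorem pvFirsts_any (L : List (Int × Int)) (c : Int × Int) :
    (pvFirsts L).any (fun t => pvCanon t == c) = L.any (fun t => pvCanon t == c) := by
  induction L using List.reverseRecOn with
  | nil => simp [pvFirsts]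
  | append_singleton L s ih =>
    rw [pvFirsts_snoc, List.any_append]
    split_ifs with h
    · rw [ih]
      by_cases hc : pvCanon s = c
      · subst hc
        rw [ih] at h
        simp [h]
      · simp [hc]
    · rw [List.any_append, ih]

-- items of A's dict after folding pvStep over L
def pvItems (L : List (Int × Int)) : List ((Int × Int) × Int) :=
  (pvFirsts L).map (fun k => (k, (pvCnt L k : Int)))

theorem pv_find_beq (l : List (Int × Int)) (k : Int × Int) (h : k ∈ l) :
    l.find? (fun x => x == k) = some k := by
  induction l with
  | nil => simp at h
  | cons a l ih =>
    by_cases hak : a = k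
    · subst hak; simp [List.find?_cons_of_pos]
    · rw [List.find?_cons_of_neg (by simp [hak])]
      rcases List.mem_cons.mp h with h' | h'
      · exact absurd h'.symm hak
      · exact ih h'

theorem pvItems_contains (L : List (Int × Int)) (k : Int × Int) :
    (PySem.Dict.mk (pvItems L)).contains k = decide (k ∈ pvFirsts L) := by
  simp [PySem.Dict.contains, pvItems, List.any_map, Function.comp_def, List.any_beq']

theorem pvItems_getD (L : List (Int × Int)) (k : Int × Int) (h : k ∈ pvFirsts L) :
    (PySem.Dict.mk (pvItems L)).getD k 0 = (pvCnt L k : Int) := by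
  simp only [PySem.Dict.getD, PySem.Dict.get?, pvItems, List.find?_map, Function.comp_def]
  rw [pv_find_beq _ _ h]
  rfl

theorem pvCnt_snoc (L : List (Int × Int)) (s k : Int × Int) :
    pvCnt (L ++ [s]) k = pvCnt L k + (if pvCanon s = pvCanon k then 1 else 0) := by
  simp [pvCnt, List.countP_append]

-- the two 'hit' branches of pvStep: modify the unique key of s's class
theorem pvStep_modify (L : List (Int × Int)) (s k0 : Int × Int)
    (hk0 : k0 ∈ pvFirsts L) (hc : pvCanon k0 = pvCanon s) :
    (PySem.Dict.mk (pvItems L)).modify k0 0 (· + 1) = PySem.Dict.mk (pvItems (L ++ [s])) := by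
  have hclass : (pvFirsts L).any (fun k => pvCanon k == pvCanon s) = true := by
    rw [List.any_eq_true]; exact ⟨k0, hk0, by simp [hc]⟩
  have hfs : pvFirsts (L ++ [s]) = pvFirsts L := by rw [pvFirsts_snoc, if_pos hclass]
  rw [PySem.Dict.modify, pvItems_getD L k0 hk0]
  have hcont : (PySem.Dict.mk (pvItems L)).contains k0 = true := by
    rw [pvItems_contains]; simpa using hk0
  rw [PySem.Dict.insert, if_pos hcont]
  apply PySem.Dict.ext
  show (pvItems L).map _ = pvItems (L ++ [s])
  rw [pvItems, pvItems, hfs, List.map_map]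
  apply List.map_congr_left
  intro k hk
  simp only [Function.comp_def]
  by_cases hkk : k = k0
  · subst hkk
    simp [pvCnt_snoc, hc.symm]
  · have hne : pvCanon k ≠ pvCanon k0 :=
      (pvFirsts_pairwise L).forall (by intro a b h he; exact h he.symm) hk hk0 hkk
    have hsk : pvCanon s ≠ pvCanon k := fun he => hne (by rw [hc, he])
    simp [hkk, pvCnt_snoc, hsk]

theorem pvStep_fold (L : List (Int × Int)) :
    L.foldl pvStep PySem.Dict.empty = PySem.Dict.mk (pvItems L) := by
  induction L using List.reverseRecOn with
  | nil => rfl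
  | append_singleton L s ih =>
    rw [List.foldl_append, List.foldl_cons, List.foldl_nil, ih]
    rw [pvStep]
    by_cases h1 : s ∈ pvFirsts L
    · rw [if_pos (by rw [pvItems_contains]; simpa using h1)]
      exact pvStep_modify L s s h1 (rfl)
    · rw [if_neg (by rw [pvItems_contains]; simpa using h1)]
      by_cases h2 : ((s.2, s.1) : Int × Int) ∈ pvFirsts L
      · rw [if_pos (by rw [pvItems_contains]; simpa using h2)]
        exact pvStep_modify L s (s.2, s.1) h2 (pvCanon_swap s)
      · rw [if_neg (by rw [pvItems_contains]; simpa using h2)]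
        have hno : (pvFirsts L).any (fun k => pvCanon k == pvCanon s) = false := by
          rw [Bool.eq_false_iff]
          intro hA
          rw [List.any_eq_true] at hA
          obtain ⟨k, hk, hkc⟩ := hA
          rw [beq_iff_eq, pvCanon_eq_iff] at hkc
          rcases hkc with rfl | rfl
          · exact h1 hk
          · exact h2 hk
        have hnoL : L.any (fun k => pvCanon k == pvCanon s) = false := by
          rw [← pvFirsts_any]; exact hno
        have hfs : pvFirsts (L ++ [s]) = pvFirsts L ++ [s] := by
          rw [pvFirsts_snoc, if_neg (by simp [hno])]
        have hcont : (PySem.Dict.mk (pvItems L)).contains s = false := by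
          rw [pvItems_contains]; simpa using h1
        rw [PySem.Dict.insert, if_neg (by simp [hcont])]
        apply PySem.Dict.ext
        show pvItems L ++ [(s, 1)] = pvItems (L ++ [s])
        rw [pvItems, pvItems, hfs, List.map_append]
        congr 1
        · apply List.map_congr_left
          intro k hk
          have hkL : k ∈ L := pvFirsts_subset L k hk
          have : pvCanon s ≠ pvCanon k := by
            intro he
            rw [Bool.eq_false_iff] at hnoL
            exact hnoL (List.any_eq_true.mpr ⟨k, hkL, by simp [he.symm]⟩)
          simp [pvCnt_snoc, this]
        · have h0 : pvCnt L s = 0 := by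
            rw [pvCnt, List.countP_eq_zero]
            intro t ht
            rw [Bool.eq_false_iff] at hnoL
            intro he
            rw [beq_iff_eq] at he
            exact hnoL (List.any_eq_true.mpr ⟨t, ht, by simp [he]⟩)
          simp [pvCnt_snoc, h0]

theorem pvFirsts_filter (L : List (Int × Int)) (P : (Int × Int) → Bool)
    (h1 : ∀ s ∈ L, P s = true → pvCnt L s ≤ 1) :
    (pvFirsts L).filter P = L.filter P := by
  induction L using List.reverseRecOn with
  | nil => simp [pvFirsts]
  | append_singleton L s ih =>
    have h1' : ∀ s' ∈ L, P s' = true → pvCnt L s' ≤ 1 := by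
      intro s' hs' hPs'
      have := h1 s' (List.mem_append_left _ hs') hPs'
      rw [pvCnt_snoc] at this
      omega
    rw [pvFirsts_snoc, List.filter_append]
    by_cases hA : (pvFirsts L).any (fun k => pvCanon k == pvCanon s) = true
    · rw [if_pos hA]
      have hPs : P s = false := by
        rw [Bool.eq_false_iff]
        intro hP
        have hle := h1 s (List.mem_append_right _ (List.mem_singleton_self s)) hP
        rw [pvFirsts_any, List.any_eq_true] at hA
        obtain ⟨t, ht, htc⟩ := hA
        have hpos : 0 < pvCnt L s := by
          rw [pvCnt, List.countP_pos_iff]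
          exact ⟨t, ht, htc⟩
        rw [pvCnt_snoc] at hle
        simp at hle
        omega
      rw [ih h1', List.filter_singleton, hPs]
      simp
    · rw [if_neg hA, List.filter_append, ih h1']

theorem pv_sides_A (polygons : List (List Int)) :
    polygons.foldl (fun edges poly =>
      (PySem.List.pyRange (-1) ((poly.length : Int) - 1)).foldl (fun edges i =>
        if edges.contains (PySem.List.pyGetD poly i 0, PySem.List.pyGetD poly (i + 1) 0) then
          edges.modify (PySem.List.pyGetD poly i 0, PySem.List.pyGetD poly (i + 1) 0) 0 (· + 1)
        else if edges.contains (PySem.List.pyGetD poly (i + 1) 0, PySem.List.pyGetD poly i 0) then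
          edges.modify (PySem.List.pyGetD poly (i + 1) 0, PySem.List.pyGetD poly i 0) 0 (· + 1)
        else edges.insert (PySem.List.pyGetD poly i 0, PySem.List.pyGetD poly (i + 1) 0) 1) edges)
      (PySem.Dict.empty : PySem.Dict (Int × Int) Int)
    = (polygons.flatMap pvSidesOf).foldl pvStep PySem.Dict.empty := by
  rw [List.foldl_flatMap]
  apply PySem.List.foldl_congr_mem
  intro acc poly _
  rw [pvSidesOf, List.foldl_map]
  rfl

theorem pv_sides_B (polygons : List (List Int)) :
    polygons.foldl (fun acc poly =>
      (PySem.List.pyRange (-1) ((poly.length : Int) - 1)).foldl (fun acc i =>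
        acc ++ [(PySem.List.pyGetD poly i 0, PySem.List.pyGetD poly (i + 1) 0)]) acc) []
    = polygons.flatMap pvSidesOf := by
  have : ∀ (acc : List (Int × Int)) (poly : List Int), poly ∈ polygons →
      (PySem.List.pyRange (-1) ((poly.length : Int) - 1)).foldl (fun acc i =>
        acc ++ [(PySem.List.pyGetD poly i 0, PySem.List.pyGetD poly (i + 1) 0)]) acc
      = acc ++ pvSidesOf poly := by
    intro acc poly _
    rw [PySem.List.foldl_append_singleton_eq_map, pvSidesOf]
  exact Eq.trans (PySem.List.foldl_congr_mem _ _ _ _ this)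
    (by rw [PySem.List.foldl_append_eq_flatMap]; simp)

-- ===== B-side lemmas =====

-- the multiset a run of pvGroups contributes: the projections of entries whose class is a singleton
def pvM (E : List ((Int × Int) × Int × (Int × Int))) : List (Int × (Int × Int)) :=
  (E.filter (fun x => E.countP (fun t => t.1 == x.1) == 1)).map (fun x => x.2)


theorem pv_countP_enumerate (L : List (Int × Int)) (s0 : Int) (p : (Int × Int) → Bool) :
    (PySem.List.enumerate L s0).countP (fun js => p js.2) = L.countP p := by
  conv_rhs => rw [← PySem.List.map_snd_enumerate L s0]
  rw [List.countP_map]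
  rfl

theorem pv_filter_map_snd_enumerate (L : List (Int × Int)) (s0 : Int) (p : (Int × Int) → Bool) :
    (((PySem.List.enumerate L s0).filter (fun js => p js.2)).map (·.2)) = L.filter p := by
  induction L generalizing s0 with
  | nil => simp [PySem.List.enumerate_nil]
  | cons x xs ih => by_cases h : p x <;> simp [PySem.List.enumerate_cons, h, ih]

theorem pvGroups_perm_aux : ∀ (n : Nat) (E : List ((Int × Int) × Int × (Int × Int))),
    E.length ≤ n → ∀ acc, (pvGroups E acc).Perm (acc ++ pvM E) := by
  intro n
  induction n with
  | zero =>
    intro E hE acc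
    rw [List.eq_nil_of_length_eq_zero (Nat.le_zero.mp hE)]
    simp [pvGroups, pvM]
  | succ n ih =>
    intro E hE acc
    match E with
    | [] => simp [pvGroups, pvM]
    | e :: rest =>
      have hsplit_eq : (e :: rest).filter (fun t => t.1 == e.1)
          = e :: rest.filter (fun t => t.1 == e.1) := by simp
      have hrest' : (e :: rest).filter (fun t => t.1 != e.1)
          = rest.filter (fun t => t.1 != e.1) := by simp
      have hlenE' : (rest.filter (fun t => t.1 != e.1)).length ≤ n := by
        have h1 := List.length_filter_le (fun t => t.1 != e.1) rest
        have h2 : rest.length ≤ n := by simpa using hE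
        omega
      -- partition permutation
      have hpart : ((e :: rest.filter (fun t => t.1 == e.1))
          ++ rest.filter (fun t => t.1 != e.1)).Perm (e :: rest) := by
        rw [← hsplit_eq, ← hrest']
        have := List.filter_append_perm (fun t => t.1 == e.1) (e :: rest)
        simpa [bne] using this
      -- class count of the head's key
      have hcntkey : (e :: rest).countP (fun t => t.1 == e.1)
          = (e :: rest.filter (fun t => t.1 == e.1)).length := by
        rw [List.countP_eq_length_filter, hsplit_eq]
      -- the filter-P of the head's group is constant
      have hPgrp : ∀ x ∈ e :: rest.filter (fun t => t.1 == e.1),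
          ((e :: rest).countP (fun t => t.1 == x.1) == 1)
            = ((e :: rest.filter (fun t => t.1 == e.1)).length == 1) := by
        intro x hx
        have hx1 : x.1 = e.1 := by
          rcases List.mem_cons.mp hx with rfl | hx'
          · rfl
          · exact beq_iff_eq.mp (List.mem_filter.mp hx').2
        rw [hx1, hcntkey]
      -- P agrees with local counting on the remainder
      have hPE' : ∀ x ∈ rest.filter (fun t => t.1 != e.1),
          ((e :: rest).countP (fun t => t.1 == x.1) == 1)
            = ((rest.filter (fun t => t.1 != e.1)).countP (fun t => t.1 == x.1) == 1) := by
        intro x hx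
        have hx1 : x.1 ≠ e.1 := by
          have := (List.mem_filter.mp hx).2
          simpa [bne_iff_ne] using this
        have hc : (e :: rest).countP (fun t => t.1 == x.1)
            = (rest.filter (fun t => t.1 != e.1)).countP (fun t => t.1 == x.1) := by
          rw [← hpart.countP_eq, List.countP_append]
          have hz : (e :: rest.filter (fun t => t.1 == e.1)).countP
              (fun t => t.1 == x.1) = 0 := by
            rw [List.countP_eq_zero]
            intro t ht
            have ht1 : t.1 = e.1 := by
              rcases List.mem_cons.mp ht with rfl | ht'
              · rfl
              · exact beq_iff_eq.mp (List.mem_filter.mp ht').2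
            rw [ht1]
            simpa using Ne.symm hx1
          omega
        rw [hc]
      -- the multiset identity for pvM
      have hMperm : (pvM (e :: rest)).Perm
          (((e :: rest.filter (fun t => t.1 == e.1)).filter
              (fun x => (e :: rest).countP (fun t => t.1 == x.1) == 1)).map (fun x => x.2)
            ++ pvM (rest.filter (fun t => t.1 != e.1))) := by
        rw [pvM, pvM]
        have h1 : ((e :: rest).filter
              (fun x => (e :: rest).countP (fun t => t.1 == x.1) == 1)).Perm
            (((e :: rest.filter (fun t => t.1 == e.1))
              ++ rest.filter (fun t => t.1 != e.1)).filter
              (fun x => (e :: rest).countP (fun t => t.1 == x.1) == 1)) :=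
          (hpart.filter _).symm
        rw [List.filter_append] at h1
        have h3 : (rest.filter (fun t => t.1 != e.1)).filter
              (fun x => (e :: rest).countP (fun t => t.1 == x.1) == 1)
            = (rest.filter (fun t => t.1 != e.1)).filter
              (fun x => (rest.filter (fun t => t.1 != e.1)).countP
                (fun t => t.1 == x.1) == 1) :=
          List.filter_congr hPE'
        rw [h3] at h1
        have h4 := h1.map (fun x : (Int × Int) × Int × (Int × Int) => x.2)
        simpa [List.map_append] using h4
      -- unfold one step of pvGroups
      simp only [pvGroups]
      rw [hrest', hsplit_eq]
      have hget : PySem.List.pyGetD (e :: rest.filter (fun t => t.1 == e.1)) 0 e = e := by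
        simp [PySem.List.pyGetD, PySem.List.pyGet?, PySem.List.pyIdx?]
      rw [hget]
      by_cases hone : (e :: rest.filter (fun t => t.1 == e.1)).length = 1
      · have htail : rest.filter (fun t => t.1 == e.1) = [] :=
          List.eq_nil_of_length_eq_zero (by simpa using hone)
        have htrue : ((e :: rest.filter (fun t => t.1 == e.1)).length == 1) = true := by
          simp only [beq_iff_eq]; exact hone
        have hfil : (e :: rest.filter (fun t => t.1 == e.1)).filter
            (fun x => (e :: rest).countP (fun t => t.1 == x.1) == 1) = [e] := by
          rw [List.filter_congr hPgrp]
          simp only [htrue, List.filter_true]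
          rw [htail]
        rw [if_pos htrue]
        refine (ih _ hlenE' _).trans ?_
        rw [hfil] at hMperm
        have heq : (acc ++ [(e.2.1, e.2.2)]) ++ pvM (rest.filter (fun t => t.1 != e.1))
            = acc ++ ([e.2] ++ pvM (rest.filter (fun t => t.1 != e.1))) := by simp
        rw [heq]
        exact List.Perm.append_left acc (by simpa using hMperm.symm)
      · have hfalse : ((e :: rest.filter (fun t => t.1 == e.1)).length == 1) = false := by
          simp only [beq_eq_false_iff_ne, ne_eq]; exact hone
        have hfil : (e :: rest.filter (fun t => t.1 == e.1)).filter
            (fun x => (e :: rest).countP (fun t => t.1 == x.1) == 1) = [] := by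
          rw [List.filter_congr hPgrp]
          simp only [hfalse, List.filter_false]
        rw [if_neg (by rw [hfalse]; exact Bool.false_ne_true)]
        refine (ih _ hlenE' _).trans ?_
        rw [hfil] at hMperm
        exact List.Perm.append_left acc (by simpa using hMperm.symm)

theorem pvGroups_perm (E : List ((Int × Int) × Int × (Int × Int))) (acc : List (Int × (Int × Int))) :
    (pvGroups E acc).Perm (acc ++ pvM E) :=
  pvGroups_perm_aux E.length E le_rfl acc

-- ===== VERDICT (by name: the statement is the Claim_ definition above) =====
theorem polygonUnsharedSides_spec : Claim_equal_polygonUnsharedSides := by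
  intro polygons _
  simp only [Spec_polygonUnsharedSides, polygonUnsharedSides, polygonUnsharedSides_alt]
  rw [pv_sides_A, pv_sides_B, pvStep_fold]
  set L := polygons.flatMap pvSidesOf with hL
  -- A's side
  have hkeys : (PySem.Dict.mk (pvItems L)).keys = pvFirsts L := by
    simp [PySem.Dict.keys, pvItems, List.map_map, Function.comp_def]
  rw [hkeys]
  have hAfilt : (pvFirsts L).filter (fun k => (PySem.Dict.mk (pvItems L)).getD k 0 == 1)
      = (pvFirsts L).filter (fun k => pvCnt L k == 1) := by
    apply List.filter_congr
    intro k hk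
    rw [pvItems_getD L k hk]
    by_cases h : pvCnt L k = 1
    · simp [h]
    · have h2 : ((pvCnt L k : Int)) ≠ 1 := by omega
      simp [h, h2]
  rw [hAfilt, pvFirsts_filter L _ (by intro s _ hP; rw [beq_iff_eq] at hP; omega)]
  -- B's side
  have hmm : (PySem.List.enumerate L 0).map
      (fun js => ((min js.2.1 js.2.2, max js.2.1 js.2.2), js.1, js.2))
      = (PySem.List.enumerate L 0).map (fun js => (pvCanon js.2, js.1, js.2)) := by
    apply List.map_congr_left
    intro js _
    rw [pvCanon_minmax]
  rw [hmm]
  -- counting in the entry list is counting classes in L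
  have hcntE : ∀ c, ((PySem.List.enumerate L 0).map
      (fun js => (pvCanon js.2, js.1, js.2))).countP (fun t => t.1 == c)
      = L.countP (fun s => pvCanon s == c) := by
    intro c
    rw [List.countP_map, ← pv_countP_enumerate L 0 (fun s => pvCanon s == c)]
    rfl
  -- the singleton-class entries, projected, in index order
  have hMfilt : (((PySem.List.enumerate L 0).map (fun js => (pvCanon js.2, js.1, js.2))).filter
      (fun x => ((PySem.List.enumerate L 0).map
        (fun js => (pvCanon js.2, js.1, js.2))).countP (fun t => t.1 == x.1) == 1))
      = ((PySem.List.enumerate L 0).filter (fun js => pvCnt L js.2 == 1)).map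
          (fun js => (pvCanon js.2, js.1, js.2)) := by
    rw [List.filter_map]
    congr 1
    apply List.filter_congr
    intro js _
    show (((PySem.List.enumerate L 0).map (fun js => (pvCanon js.2, js.1, js.2))).countP
      (fun t => t.1 == pvCanon js.2) == 1) = (pvCnt L js.2 == 1)
    rw [hcntE (pvCanon js.2)]
    rfl
  have hMeq : pvM ((PySem.List.enumerate L 0).map (fun js => (pvCanon js.2, js.1, js.2)))
      = (PySem.List.enumerate L 0).filter (fun js => pvCnt L js.2 == 1) := by
    rw [pvM, hMfilt, List.map_map]
    have : ((fun x : (Int × Int) × Int × (Int × Int) => x.2)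
        ∘ (fun js : Int × (Int × Int) => (pvCanon js.2, js.1, js.2)))
        = fun js : Int × (Int × Int) => js := by
      funext js
      rfl
    rw [this, List.map_id']
  have hMpair : ((PySem.List.enumerate L 0).filter
      (fun js => pvCnt L js.2 == 1)).Pairwise (fun a b => a.1 < b.1) :=
    List.Pairwise.filter _ (PySem.List.pairwise_lt_enumerate ..)
  have hperm : ((PySem.List.enumerate L 0).filter (fun js => pvCnt L js.2 == 1)).Perm
      (pvGroups ((PySem.List.enumerate L 0).map
        (fun js => (pvCanon js.2, js.1, js.2))) []) := by
    refine ((pvGroups_perm _ []).trans ?_).symm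
    rw [List.nil_append, hMeq]
  have hsorted := PySem.List.sorted_eq_of_perm_of_pairwise_lt
    (pvGroups ((PySem.List.enumerate L 0).map (fun js => (pvCanon js.2, js.1, js.2))) [])
    ((PySem.List.enumerate L 0).filter (fun js => pvCnt L js.2 == 1))
    (fun t : Int × (Int × Int) => t.1) hperm hMpair
  rw [hsorted]
  rw [show (fun t : Int × (Int × Int) => t.2) = (·.2) from rfl,
    pv_filter_map_snd_enumerate L 0 (fun s => pvCnt L s == 1)]
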